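-- pv_equiv track=rewrite | github.com/winteeeee/TodaysNews-backend | cluster/src/main/cluster/cluster_maker.py | _count_articles
-- ===== SOURCE A (Python) =====
-- def _count_articles(labels):
--     counts = {}
--     for label in labels:
--         if label not in counts.keys():
--             counts[label] = 0
--         else:
--             counts[label] += 1
--     return counts
-- ===== SOURCE B (Python) =====
-- def _count_articles(labels):
--     return {label: labels.count(label) - 1 for label in dict.fromkeys(labels)}
-- ===== Notes on version B (the rewrite author's own statement) =====
-- stated objective: simpler
-- what changed: A's single stateful pass that conditionally initialises or increments a running dict is replaced by a two-phase scheme: dedup the labels in first-appearance order (dict.fromkeys) and then for each distinct label count its occurrences with list.count, yielding count-1 per label.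
import Mathlib
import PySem

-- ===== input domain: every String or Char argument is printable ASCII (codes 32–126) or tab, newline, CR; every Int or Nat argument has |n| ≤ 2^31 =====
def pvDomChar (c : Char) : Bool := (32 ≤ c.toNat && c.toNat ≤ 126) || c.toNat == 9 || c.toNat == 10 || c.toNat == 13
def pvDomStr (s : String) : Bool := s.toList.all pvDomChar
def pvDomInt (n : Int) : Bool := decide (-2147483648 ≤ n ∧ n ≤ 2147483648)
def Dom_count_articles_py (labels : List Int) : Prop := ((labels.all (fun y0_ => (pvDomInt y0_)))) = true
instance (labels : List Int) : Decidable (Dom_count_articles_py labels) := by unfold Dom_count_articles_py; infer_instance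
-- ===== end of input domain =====

-- B replaces A's single stateful dict-building pass by a two-phase scheme: dedup the labels
-- in first-appearance order, then count each distinct label's occurrences with list.count (simpler decomposition).

-- ===== PORT A =====
def count_articles_py (labels : List Int) : List (Int × Int) :=
  (labels.foldl
    (fun counts label =>
      if counts.contains label = false then counts.insert label 0
      else counts.insert label (counts.getD label 0 + 1))
    PySem.Dict.empty).items

-- ===== PORT B =====
def count_articles_py_alt (labels : List Int) : List (Int × Int) :=
  (PySem.List.dedup labels).map (fun label => (label, (PySem.List.count labels label : Int) - 1))

-- ===== PRECONDITION & SPEC =====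
def Spec_count_articles_py (labels : List Int) (out : List (Int × Int)) : Prop := out = count_articles_py_alt labels
instance (labels : List Int) (out : List (Int × Int)) : Decidable (Spec_count_articles_py labels out) := by unfold Spec_count_articles_py; infer_instance

-- ===== CLAIM (what is proved, stated in full; the proofs are below) =====
def Claim_equal_count_articles_py : Prop := ∀ (labels : List Int), Dom_count_articles_py labels → Spec_count_articles_py labels (count_articles_py labels)

-- ===== LEMMAS AND PROOFS =====

-- Invariant: after processing prefix p, A's dict items list pairs each first-occurrence-deduped
-- label of p with its count in p minus one; carried through the remaining suffix l.
theorem countA_items_inv (l p : List Int) (d : PySem.Dict Int Int)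
    (h : d.items = (PySem.List.dedup p).map (fun k => (k, (p.count k : Int) - 1))) :
    (l.foldl
      (fun counts label =>
        if counts.contains label = false then counts.insert label 0
        else counts.insert label (counts.getD label 0 + 1)) d).items
    = (PySem.List.dedup (p ++ l)).map (fun k => (k, ((p ++ l).count k : Int) - 1)) := by
  induction l generalizing p d with
  | nil => simpa using h
  | cons x xs ih =>
    have hkeys : d.keys = PySem.List.dedup p := by
      simp only [PySem.Dict.keys, h, List.map_map]; simp [Function.comp_def]
    have hnd : d.keys.Nodup := by rw [hkeys]; exact PySem.List.nodup_dedup p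
    have hc : d.contains x = decide (x ∈ p) := by
      rw [PySem.Dict.contains_eq_decide_mem_keys, hkeys]
      simp
    have hded : PySem.List.dedup (p ++ [x])
        = if x ∈ p then PySem.List.dedup p else PySem.List.dedup p ++ [x] := by
      simp only [PySem.List.dedup_eq_ofList, PySem.Set.ofList_eq_foldl, List.foldl_append]
      by_cases hx : x ∈ p
      · simp [PySem.Set.add, hx, PySem.Set.contains,
          ← PySem.Set.ofList_eq_foldl, PySem.Set.mem_ofList]
      · simp [PySem.Set.add, hx, PySem.Set.contains,
          ← PySem.Set.ofList_eq_foldl, PySem.Set.mem_ofList]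
    have hstep :
        ((if d.contains x = false then d.insert x 0
          else d.insert x (d.getD x 0 + 1))).items
        = (PySem.List.dedup (p ++ [x])).map (fun k => (k, ((p ++ [x]).count k : Int) - 1)) := by
      by_cases hx : x ∈ p
      · -- existing key: value becomes (count p x - 1) + 1 = count (p++[x]) x - 1
        have hcx : d.contains x = true := by rw [hc]; simp [hx]
        have hmem : (x, ((p.count x : Int) - 1)) ∈ d.items := by
          rw [h]
          exact List.mem_map_of_mem (by rw [PySem.List.mem_dedup]; exact hx)
        have hgd : d.getD x 0 = (p.count x : Int) - 1 :=
          PySem.Dict.getD_of_mem_items _ hmem hnd 0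
        rw [hcx]
        simp only [Bool.true_eq_false, if_false]
        rw [PySem.Dict.items_insert_of_contains _ _ hcx, h, List.map_map, hded, if_pos hx]
        apply List.map_congr_left
        intro k hk
        by_cases hkx : k = x
        · subst hkx
          simp [hgd, List.count_append]
        · simp [Function.comp, List.count_append, hkx, Ne.symm hkx]
      · -- fresh key: appended with value 0 = count (p++[x]) x - 1
        have hcx : d.contains x = false := by rw [hc]; simp [hx]
        rw [hcx]
        simp only [if_true]
        rw [PySem.Dict.items_insert_of_not_contains _ _ hcx, h, hded, if_neg hx,
          List.map_append]
        have hcnt : (p ++ [x]).count x = p.count x + 1 := by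
          simp [List.count_append]
        congr 1
        · apply List.map_congr_left
          intro k hk
          have hkx : k ≠ x := by
            intro hkk; subst hkk
            exact hx ((PySem.List.mem_dedup p k).mp hk)
          simp [List.count_append, Ne.symm hkx]
        · have : p.count x = 0 := List.count_eq_zero.mpr hx
          simp [List.count_append, this]
    simp only [List.foldl_cons]
    have := ih (p ++ [x]) _ hstep
    simpa [List.append_assoc] using this

-- ===== VERDICT (by name: the statement is the Claim_ definition above) =====
theorem count_articles_py_spec : Claim_equal_count_articles_py := by
  intro labels _
  show count_articles_py labels = count_articles_py_alt labels
  have := countA_items_inv labels [] PySem.Dict.empty (by rfl)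
  simpa [count_articles_py, count_articles_py_alt, PySem.List.count] using this
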